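-- pv_equiv track=rewrite | github.com/Logenleedev/--Data-Structure-and-Algorithm | Extra/Company_OA/JPMorgan_HK/gameWinner.py | gamewinner
-- ===== SOURCE A (Python) =====
-- def gamewinner(string):
--
--
--     w_count = 0
--     b_count = 0
--
--     for i in range(1, len(string) - 1):
--         if string[i] == 'w' and string[i + 1] == 'w' and string[i - 1] == 'w':
--             w_count += 1
--         if string[i] == 'b' and string[i + 1] == 'b' and string[i - 1] == 'b':
--             b_count += 1
--
--
--
--     if w_count < b_count:
--         return 'Bob'
--     elif w_count > b_count:
--         return 'Wendy'
--     else: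
--         return 'Bob'
-- ===== SOURCE B (Python) =====
-- def gamewinner(string):
--     # One pass over maximal runs: a run of k equal chars contains max(0, k-2)
--     # centered triples, so only run lengths matter.
--     w_count = 0
--     b_count = 0
--     i = 0
--     n = len(string)
--     while i < n:
--         j = i + 1
--         while j < n and string[j] == string[i]:
--             j += 1
--         run = j - i
--         if string[i] == 'w':
--             w_count += max(0, run - 2)
--         elif string[i] == 'b':
--             b_count += max(0, run - 2)
--         i = j
--     return 'Wendy' if w_count > b_count else 'Bob'
-- ===== Notes on version B (the rewrite author's own statement) =====
-- stated objective: alternative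
-- what changed: B iterates over maximal runs of equal characters (a hand-rolled groupby) and adds max(0, run-2) per 'w'/'b' run, instead of A's index loop testing every 3-character window.
import Mathlib
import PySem

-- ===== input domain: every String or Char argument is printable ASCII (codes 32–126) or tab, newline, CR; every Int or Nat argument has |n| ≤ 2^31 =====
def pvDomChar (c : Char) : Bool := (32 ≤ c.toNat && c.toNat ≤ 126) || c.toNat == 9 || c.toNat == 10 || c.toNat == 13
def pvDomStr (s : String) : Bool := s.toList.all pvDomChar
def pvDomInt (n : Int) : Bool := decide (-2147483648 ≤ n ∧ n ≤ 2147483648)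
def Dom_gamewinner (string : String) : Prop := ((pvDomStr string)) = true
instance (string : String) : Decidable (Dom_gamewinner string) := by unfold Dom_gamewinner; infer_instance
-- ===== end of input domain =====

-- B replaces A's per-index 3-window loop by a single pass over maximal runs of equal
-- characters, adding max(0, run-2) per 'w'/'b' run (objective: alternative decomposition).

-- ===== PORT A =====
-- indices i-1, i, i+1 are always in range for i in range(1, len-1), so the pyGetD default is never read
def gamewinner (string : String) : String :=
  let l := string.toList
  let st := (PySem.List.pyRange 1 ((l.length : Int) - 1) 1).foldl
    (fun (st : Int × Int) i =>
      let st :=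
        if PySem.List.pyGetD l i ' ' = 'w' ∧ PySem.List.pyGetD l (i + 1) ' ' = 'w' ∧
            PySem.List.pyGetD l (i - 1) ' ' = 'w' then (st.1 + 1, st.2) else st
      if PySem.List.pyGetD l i ' ' = 'b' ∧ PySem.List.pyGetD l (i + 1) ' ' = 'b' ∧
          PySem.List.pyGetD l (i - 1) ' ' = 'b' then (st.1, st.2 + 1) else st)
    (0, 0)
  if st.1 < st.2 then "Bob" else if st.1 > st.2 then "Wendy" else "Bob"

-- ===== PORT B =====
-- outer while loop of Source B: one step per maximal run (takeWhile = the inner while scanning j)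
def altLoop (cs : List Char) (w b : Int) : Int × Int :=
  match cs with
  | [] => (w, b)
  | x :: t =>
    let run : Int := ((t.takeWhile (· == x)).length : Int) + 1
    let rest := t.dropWhile (· == x)
    if x = 'w' then altLoop rest (w + max 0 (run - 2)) b
    else if x = 'b' then altLoop rest w (b + max 0 (run - 2))
    else altLoop rest w b
termination_by cs.length
decreasing_by all_goals simpa using Nat.lt_succ_of_le (List.length_dropWhile_le _ t)

def gamewinner_alt (string : String) : String :=
  let st := altLoop string.toList 0 0
  if st.1 > st.2 then "Wendy" else "Bob"

-- ===== PRECONDITION & SPEC =====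
def Spec_gamewinner (string : String) (out : String) : Prop := out = gamewinner_alt string
instance (string : String) (out : String) : Decidable (Spec_gamewinner string out) := by unfold Spec_gamewinner; infer_instance

-- ===== CLAIM (what is proved, stated in full; the proofs are below) =====
def Claim_equal_gamewinner : Prop := ∀ (string : String), Dom_gamewinner string → Spec_gamewinner string (gamewinner string)

-- ===== LEMMAS AND PROOFS =====

-- number of indices whose 3-window (i-1, i, i+1) is all equal to c, written structurally
def countT (c : Char) : List Char → Int
  | x :: y :: z :: t => (if x = c ∧ y = c ∧ z = c then 1 else 0) + countT c (y :: z :: t)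
  | _ => 0

-- the window indicator at Nat offset k (same conjunct order as port A's test at i = k+1)
def win (c : Char) (l : List Char) (k : Nat) : Int :=
  if l.getD (k + 1) ' ' = c ∧ l.getD (k + 2) ' ' = c ∧ l.getD k ' ' = c then 1 else 0

lemma sum_win (c : Char) (l : List Char) :
    ((List.range (l.length - 2)).map (win c l)).sum = countT c l := by
  induction l with
  | nil => simp [countT]
  | cons x t ih =>
    match t with
    | [] => simp [countT]
    | [y] => simp [countT]
    | y :: z :: t' =>
      have hlen : (x :: y :: z :: t').length - 2 = t'.length + 1 := by simp
      rw [hlen, List.range_succ_eq_map]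
      have hshift : ∀ k : Nat, win c (x :: y :: z :: t') (k + 1) = win c (y :: z :: t') k := by
        intro k; simp [win]
      have hmap : (List.map Nat.succ (List.range t'.length)).map (win c (x :: y :: z :: t'))
          = (List.range t'.length).map (win c (y :: z :: t')) := by
        rw [List.map_map]; exact List.map_congr_left (fun k _ => hshift k)
      have hlen' : (y :: z :: t').length - 2 = t'.length := by simp
      have h0 : win c (x :: y :: z :: t') 0 = (if x = c ∧ y = c ∧ z = c then 1 else 0) := by
        simp [win]; by_cases hx : x = c <;> by_cases hy : y = c <;> by_cases hz : z = c <;>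
          simp [hx, hy, hz]
      calc (win c (x :: y :: z :: t') 0 ::
              (List.map Nat.succ (List.range t'.length)).map (win c (x :: y :: z :: t'))).sum
          = win c (x :: y :: z :: t') 0 +
              ((List.range t'.length).map (win c (y :: z :: t'))).sum := by rw [hmap]; simp
        _ = (if x = c ∧ y = c ∧ z = c then 1 else 0) + countT c (y :: z :: t') := by
              rw [h0, ← hlen', ih]
        _ = countT c (x :: y :: z :: t') := by rw [countT]

-- A's index sum over pyRange equals countT
lemma pyRange_sum_eq_countT (c : Char) (l : List Char) :
    ((PySem.List.pyRange 1 ((l.length : Int) - 1) 1).map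
      (fun i => if PySem.List.pyGetD l i ' ' = c ∧ PySem.List.pyGetD l (i + 1) ' ' = c ∧
          PySem.List.pyGetD l (i - 1) ' ' = c then (1 : Int) else 0)).sum = countT c l := by
  rw [PySem.List.pyRange_one, List.map_map]
  have htn : (((l.length : Int) - 1) - 1).toNat = l.length - 2 := by omega
  rw [htn]
  have : ((fun i => if PySem.List.pyGetD l i ' ' = c ∧ PySem.List.pyGetD l (i + 1) ' ' = c ∧
        PySem.List.pyGetD l (i - 1) ' ' = c then (1 : Int) else 0) ∘ (fun k : Nat => (1 : Int) + k))
      = win c l := by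
    funext k
    have e1 : (1 : Int) + (k : Int) = ((k + 1 : Nat) : Int) := by push_cast; ring
    have e2 : (1 : Int) + (k : Int) + 1 = ((k + 2 : Nat) : Int) := by push_cast; ring
    have e3 : (1 : Int) + (k : Int) - 1 = ((k : Nat) : Int) := by omega
    simp only [Function.comp]
    simp only [e2, e3]
    simp only [e1]
    simp only [PySem.List.pyGetD_natCast, win]
  rw [this, sum_win]

-- a run of m copies of x followed by v (whose head is not x) contributes max 0 (m-2) windows for c = x
lemma countT_replicate (c x : Char) (v : List Char) (hv : ∀ y, v.head? = some y → y ≠ x) :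
    ∀ m : Nat, countT c (List.replicate m x ++ v)
      = (if x = c then max 0 ((m : Int) - 2) else 0) + countT c v := by
  intro m
  induction m with
  | zero => simp
  | succ n ih =>
    match n, ih with
    | 0, _ =>
      -- list = x :: v
      match v, hv with
      | [], _ => simp [countT]
      | [y], _ => simp [countT]
      | y :: z :: t, hv =>
        have hy : y ≠ x := hv y rfl
        have : ¬ (x = c ∧ y = c ∧ z = c) := by rintro ⟨h1, h2, _⟩; exact hy (h2.trans h1.symm)
        simp [countT, this]
    | 1, _ =>
      -- list = x :: x :: v
      match v, hv with
      | [], _ => simp [countT]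
      | [y], hv =>
        have hy : y ≠ x := hv y rfl
        have : ¬ (x = c ∧ x = c ∧ y = c) := by rintro ⟨h1, _, h3⟩; exact hy (h3.trans h1.symm)
        simp [countT, this]
      | y :: z :: t, hv =>
        have hy : y ≠ x := hv y rfl
        have h1 : ¬ (x = c ∧ x = c ∧ y = c) := by rintro ⟨ha, _, hc⟩; exact hy (hc.trans ha.symm)
        have h2 : ¬ (x = c ∧ y = c ∧ z = c) := by rintro ⟨ha, hb, _⟩; exact hy (hb.trans ha.symm)
        simp [countT, h1, h2]
    | (n' + 2), ih =>
      -- list = x :: x :: x :: (replicate n' x ++ v)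
      have hrep : List.replicate (n' + 3) x ++ v
          = x :: x :: x :: (List.replicate n' x ++ v) := by simp [List.replicate_succ]
      have hrep2 : x :: x :: (List.replicate n' x ++ v) = List.replicate (n' + 2) x ++ v := by
        simp [List.replicate_succ]
      rw [hrep, countT, hrep2, ih]
      by_cases hx : x = c
      · rw [if_pos (show x = c ∧ x = c ∧ x = c from ⟨hx, hx, hx⟩), if_pos hx, if_pos hx]
        rw [max_eq_right (by push_cast; omega), max_eq_right (by push_cast; omega)]
        push_cast; ring
      · have hall : ¬ (x = c ∧ x = c ∧ x = c) := by tauto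
        rw [if_neg hall, if_neg hx, if_neg hx]; ring

lemma altLoop_eq : ∀ n (l : List Char), l.length ≤ n → ∀ w b,
    altLoop l w b = (w + countT 'w' l, b + countT 'b' l) := by
  intro n
  induction n with
  | zero =>
    intro l hl w b
    have : l = [] := by cases l <;> simp_all
    subst this; simp [altLoop, countT]
  | succ n ih =>
    intro l hl w b
    match l with
    | [] => simp [altLoop, countT]
    | x :: t =>
      have hu : t.takeWhile (· == x) = List.replicate (t.takeWhile (· == x)).length x := by
        apply List.eq_replicate_of_mem
        intro y hy; have := List.mem_takeWhile_imp hy; simpa using this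
      have hsplit : x :: t
          = List.replicate ((t.takeWhile (· == x)).length + 1) x ++ t.dropWhile (· == x) := by
        rw [List.replicate_succ, List.cons_append]
        conv_lhs => rw [← List.takeWhile_append_dropWhile (p := (· == x)) (l := t)]
        rw [← hu]
      have hv : ∀ y, (t.dropWhile (· == x)).head? = some y → y ≠ x := by
        intro y hy
        have := List.head?_dropWhile_not (· == x) t
        rw [hy] at this; simpa using this
      have hrest : (t.dropWhile (· == x)).length ≤ n := by
        have := List.length_dropWhile_le (· == x) t
        simp at hl; omega
      have hcount : ∀ c, countT c (x :: t)
          = (if x = c then max 0 ((((t.takeWhile (· == x)).length : Int) + 1) - 2) else 0)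
            + countT c (t.dropWhile (· == x)) := by
        intro c
        rw [hsplit, countT_replicate c x _ hv ((t.takeWhile (· == x)).length + 1)]
        push_cast; ring_nf
      rw [altLoop]
      by_cases hw : x = 'w'
      · subst hw
        rw [if_pos rfl, ih _ hrest]
        rw [hcount 'w', hcount 'b', if_pos rfl, if_neg (by decide : ¬ ('w' : Char) = 'b')]
        exact Prod.ext (by ring) (by ring)
      · by_cases hb : x = 'b'
        · subst hb
          rw [if_neg hw, if_pos rfl, ih _ hrest]
          rw [hcount 'w', hcount 'b', if_neg hw, if_pos rfl]
          exact Prod.ext (by ring) (by ring)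
        · rw [if_neg hw, if_neg hb, ih _ hrest]
          rw [hcount 'w', hcount 'b', if_neg hw, if_neg hb]
          exact Prod.ext (by ring) (by ring)

-- A's fold computes (countT 'w', countT 'b')
lemma A_fold (l : List Char) :
    (PySem.List.pyRange 1 ((l.length : Int) - 1) 1).foldl
      (fun (st : Int × Int) i =>
        let st :=
          if PySem.List.pyGetD l i ' ' = 'w' ∧ PySem.List.pyGetD l (i + 1) ' ' = 'w' ∧
              PySem.List.pyGetD l (i - 1) ' ' = 'w' then (st.1 + 1, st.2) else st
        if PySem.List.pyGetD l i ' ' = 'b' ∧ PySem.List.pyGetD l (i + 1) ' ' = 'b' ∧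
            PySem.List.pyGetD l (i - 1) ' ' = 'b' then (st.1, st.2 + 1) else st)
      (0, 0) = (countT 'w' l, countT 'b' l) := by
  have hstep : (fun (st : Int × Int) i =>
        let st :=
          if PySem.List.pyGetD l i ' ' = 'w' ∧ PySem.List.pyGetD l (i + 1) ' ' = 'w' ∧
              PySem.List.pyGetD l (i - 1) ' ' = 'w' then (st.1 + 1, st.2) else st
        if PySem.List.pyGetD l i ' ' = 'b' ∧ PySem.List.pyGetD l (i + 1) ' ' = 'b' ∧
            PySem.List.pyGetD l (i - 1) ' ' = 'b' then (st.1, st.2 + 1) else st)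
      = (fun (st : Int × Int) i =>
        (st.1 + (if PySem.List.pyGetD l i ' ' = 'w' ∧ PySem.List.pyGetD l (i + 1) ' ' = 'w' ∧
              PySem.List.pyGetD l (i - 1) ' ' = 'w' then (1 : Int) else 0),
         st.2 + (if PySem.List.pyGetD l i ' ' = 'b' ∧ PySem.List.pyGetD l (i + 1) ' ' = 'b' ∧
              PySem.List.pyGetD l (i - 1) ' ' = 'b' then (1 : Int) else 0))) := by
    funext st i; dsimp only; split_ifs <;> simp
  rw [hstep]
  rw [PySem.List.foldl_prod_mk
    (f := fun (a : Int) i => a + (if PySem.List.pyGetD l i ' ' = 'w' ∧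
        PySem.List.pyGetD l (i + 1) ' ' = 'w' ∧ PySem.List.pyGetD l (i - 1) ' ' = 'w'
      then (1 : Int) else 0))
    (g := fun (a : Int) i => a + (if PySem.List.pyGetD l i ' ' = 'b' ∧
        PySem.List.pyGetD l (i + 1) ' ' = 'b' ∧ PySem.List.pyGetD l (i - 1) ' ' = 'b'
      then (1 : Int) else 0))]
  rw [PySem.List.foldl_add, PySem.List.foldl_add]
  rw [pyRange_sum_eq_countT, pyRange_sum_eq_countT]; simp

-- ===== VERDICT (by name: the statement is the Claim_ definition above) =====
theorem gamewinner_spec : Claim_equal_gamewinner := by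
  intro s _
  unfold Spec_gamewinner gamewinner gamewinner_alt
  dsimp only
  rw [A_fold, altLoop_eq s.toList.length s.toList le_rfl 0 0]
  simp only [zero_add]
  rcases lt_trichotomy (countT 'w' s.toList) (countT 'b' s.toList) with h | h | h
  · simp [h, not_lt.mpr (le_of_lt h)]
  · simp [h]
  · simp [not_lt.mpr (le_of_lt h), h]
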